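-- pv_equiv track=rewrite | github.com/yingliufengpeng/algorithm | zhengwei/05 字符串专题/19 字符串应用_尺取法的应用.py | containall
-- ===== SOURCE A (Python) =====
-- def containall(w, i, j):
--     c1 = c2 = c3 = 0
--
--     for e in w[i: j + 1]:
--
--         if e == 'h':
--             c1 += 1
--
--         elif e == 'i':
--             c2 += 1
--
--         elif e == 'o':
--             c3 += 1
--
--         else:
--             pass
--
--     return c1 >= 2 and c2 >= 1 and c3 >= 1
-- ===== SOURCE B (Python) =====
-- def containall(w, i, j):
--     s = w[i: j + 1]
--     k = s.find('h')
--     return k != -1 and s.find('h', k + 1) != -1 and 'i' in s and 'o' in s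
-- ===== Notes on version B (the rewrite author's own statement) =====
-- stated objective: alternative
-- what changed: Replaces the counting loop and threshold tests with substring search: locate the first 'h' with find, look for a second 'h' with find from just past it, and use membership tests for 'i' and 'o', so no counters are maintained at all.
import Mathlib
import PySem

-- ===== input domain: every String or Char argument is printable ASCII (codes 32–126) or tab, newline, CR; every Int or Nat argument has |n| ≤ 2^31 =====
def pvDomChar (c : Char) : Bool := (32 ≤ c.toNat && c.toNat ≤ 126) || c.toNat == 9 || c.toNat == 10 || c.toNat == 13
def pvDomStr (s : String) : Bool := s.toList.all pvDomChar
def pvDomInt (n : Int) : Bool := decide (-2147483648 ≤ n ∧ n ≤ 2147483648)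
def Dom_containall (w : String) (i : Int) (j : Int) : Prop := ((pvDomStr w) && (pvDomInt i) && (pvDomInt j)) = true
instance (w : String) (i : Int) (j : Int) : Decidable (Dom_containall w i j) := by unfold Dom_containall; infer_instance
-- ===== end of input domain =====

-- B replaces A's counting loop with substring search (find the first 'h', a second 'h' past it, and membership of 'i'/'o'); alternative algorithm, same cost.


-- ===== PORT A =====
-- literal port: one pass over w[i:j+1] with three counters updated by an if/elif ladder
def containall (w : String) (i : Int) (j : Int) : Bool :=
  let cnts := (PySem.Chars.slice w.toList (some i) (some (j + 1))).foldl
    (fun (c : Int × Int × Int) e =>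
      if e == 'h' then (c.1 + 1, c.2.1, c.2.2)
      else if e == 'i' then (c.1, c.2.1 + 1, c.2.2)
      else if e == 'o' then (c.1, c.2.1, c.2.2 + 1)
      else c) (0, 0, 0)
  decide (2 ≤ cnts.1) && decide (1 ≤ cnts.2.1) && decide (1 ≤ cnts.2.2)

-- ===== PORT B =====
-- literal port of Source B: s = w[i:j+1]; k = s.find('h'); k != -1 and s.find('h', k+1) != -1 and 'i' in s and 'o' in s
def containall_alt (w : String) (i : Int) (j : Int) : Bool :=
  let s := PySem.Chars.slice w.toList (some i) (some (j + 1))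
  let k := PySem.Chars.find s ['h']
  decide (k ≠ -1) && decide (PySem.Chars.findFrom s ['h'] (k + 1) none ≠ -1)
    && PySem.Chars.isIn ['i'] s && PySem.Chars.isIn ['o'] s

-- ===== PRECONDITION & SPEC =====
def Spec_containall (w : String) (i : Int) (j : Int) (out : Bool) : Prop := out = containall_alt w i j
instance (w : String) (i : Int) (j : Int) (out : Bool) : Decidable (Spec_containall w i j out) := by unfold Spec_containall; infer_instance

-- ===== CLAIM (what is proved, stated in full; the proofs are below) =====
def Claim_equal_containall : Prop := ∀ (w : String) (i : Int) (j : Int), Dom_containall w i j → Spec_containall w i j (containall w i j)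

-- ===== LEMMAS AND PROOFS =====

-- A's fold accumulates exactly the three character counts
theorem fold_counts (l : List Char) (a b c : Int) :
    l.foldl (fun (s : Int × Int × Int) e =>
      if e == 'h' then (s.1 + 1, s.2.1, s.2.2)
      else if e == 'i' then (s.1, s.2.1 + 1, s.2.2)
      else if e == 'o' then (s.1, s.2.1, s.2.2 + 1)
      else s) (a, b, c)
    = (a + l.count 'h', b + l.count 'i', c + l.count 'o') := by
  induction l generalizing a b c with
  | nil => simp
  | cons x t ih =>
    simp only [List.foldl_cons]
    by_cases hh : x = 'h'
    · subst hh
      rw [if_pos (by decide), ih]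
      simp only [List.count_cons, Prod.ext_iff, beq_self_eq_true, if_true]
      push_cast; omega
    · by_cases hi : x = 'i'
      · subst hi
        rw [if_neg (by decide), if_pos (by decide), ih]
        simp only [List.count_cons, Prod.ext_iff, beq_self_eq_true, if_true,
          beq_iff_eq, if_neg (by decide : ¬ ('i' = 'h'))]
        push_cast; omega
      · by_cases ho : x = 'o'
        · subst ho
          rw [if_neg (by decide), if_neg (by decide), if_pos (by decide), ih]
          simp only [List.count_cons, Prod.ext_iff, beq_self_eq_true, if_true,
            beq_iff_eq, if_neg (by decide : ¬ ('o' = 'h')), if_neg (by decide : ¬ ('o' = 'i'))]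
          push_cast; omega
        · rw [if_neg (by simp [hh]), if_neg (by simp [hi]), if_neg (by simp [ho]), ih]
          simp [hh, hi, ho]

-- a one-character needle is a prefix iff it is the head
theorem singleton_prefix_head (c : Char) (t : List Char) :
    [c] <+: t ↔ t.head? = some c := by
  cases t with
  | nil => simp
  | cons x xs => simp [List.cons_prefix_cons, eq_comm]

-- a one-character needle is an infix iff the character occurs
theorem singleton_infix_mem (c : Char) (t : List Char) :
    [c] <:+: t ↔ c ∈ t := by
  constructor
  · intro h; exact (List.singleton_sublist).1 h.sublist
  · intro h
    obtain ⟨l₁, l₂, rfl⟩ := List.append_of_mem h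
    exact ⟨l₁, l₂, by simp⟩

-- 'c in s' decides "count ≥ 1"
theorem isIn_count (c : Char) (s : List Char) :
    PySem.Chars.isIn [c] s = decide (1 ≤ (s.count c : Int)) := by
  rw [Bool.eq_iff_iff, PySem.Chars.isIn_iff_infix, singleton_infix_mem,
    decide_eq_true_iff, ← List.count_pos_iff]
  omega

-- the two finds decide "count of 'h' ≥ 2"
theorem h_part (s : List Char) :
    (decide (PySem.Chars.find s ['h'] ≠ -1) &&
      decide (PySem.Chars.findFrom s ['h'] (PySem.Chars.find s ['h'] + 1) none ≠ -1))
    = decide (2 ≤ (s.count 'h' : Int)) := by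
  by_cases hmem : 'h' ∈ s
  · have hpos : 0 ≤ PySem.Chars.find s ['h'] :=
      (PySem.Chars.find_nonneg_iff s ['h']).2 ((singleton_infix_mem _ _).2 hmem)
    set n := (PySem.Chars.find s ['h']).toNat with hn
    have hfind : PySem.Chars.find s ['h'] = (n : Int) := by omega
    obtain ⟨hpre, hmin⟩ := PySem.Chars.find_spec hpos
    have hAt : s[n]? = some 'h' := by
      rw [← List.head?_drop]; exact (singleton_prefix_head _ _).1 hpre
    have hlt : n < s.length := by
      by_contra h
      simp [List.getElem?_eq_none (le_of_not_gt h)] at hAt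
    -- the second find: from index n+1
    have hsnd : (PySem.Chars.findFrom s ['h'] (PySem.Chars.find s ['h'] + 1) none ≠ -1)
        ↔ 'h' ∈ s.drop (n + 1) := by
      rw [hfind]
      have : ((n : Int) + 1) = ((n + 1 : Nat) : Int) := by push_cast; ring
      rw [this, not_iff_comm, Iff.comm,
        PySem.Chars.findFrom_natCast_eq_neg_one_iff s ['h'] (n+1) (by omega),
        singleton_infix_mem]
    -- the count decomposition
    have hnone : (s.take n).count 'h' = 0 := by
      rw [List.count_eq_zero]
      intro hmemtake
      obtain ⟨i, hi, hgi⟩ := List.mem_iff_getElem.1 hmemtake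
      have hil : i < n := by simp at hi; omega
      have hil2 : i < s.length := by omega
      apply hmin i hil
      rw [singleton_prefix_head, List.head?_drop, List.getElem?_eq_getElem hil2]
      simpa [List.getElem_take] using hgi
    have hcnt : s.count 'h' = (s.take (n+1)).count 'h' + (s.drop (n+1)).count 'h' := by
      conv_lhs => rw [← List.take_append_drop (n+1) s]
      rw [List.count_append]
    have htake1 : (s.take (n+1)).count 'h' = 1 := by
      rw [List.take_add_one, List.count_append, hnone, hAt]
      simp
    have hdropmem : 'h' ∈ s.drop (n+1) ↔ 0 < (s.drop (n+1)).count 'h' := (List.count_pos_iff).symm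
    rw [Bool.eq_iff_iff]
    simp only [Bool.and_eq_true, decide_eq_true_iff]
    rw [hsnd, hdropmem, hcnt, htake1, hfind]
    constructor
    · rintro ⟨-, h2⟩; push_cast; omega
    · intro h2; refine ⟨by omega, by push_cast at h2; omega⟩
  · have : PySem.Chars.find s ['h'] = -1 :=
      (PySem.Chars.find_eq_neg_one_iff s ['h']).2 (by rw [singleton_infix_mem]; exact hmem)
    have hc : s.count 'h' = 0 := List.count_eq_zero.2 hmem
    simp [this, hc]

-- B's search expression decides A's three threshold tests on the slice
theorem search_counts (s : List Char) :
    (decide (PySem.Chars.find s ['h'] ≠ -1) &&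
      decide (PySem.Chars.findFrom s ['h'] (PySem.Chars.find s ['h'] + 1) none ≠ -1) &&
      PySem.Chars.isIn ['i'] s && PySem.Chars.isIn ['o'] s)
    = (decide (2 ≤ (s.count 'h' : Int)) && decide (1 ≤ (s.count 'i' : Int))
        && decide (1 ≤ (s.count 'o' : Int))) := by
  rw [h_part, isIn_count, isIn_count]

-- ===== VERDICT (by name: the statement is the Claim_ definition above) =====
theorem containall_spec : Claim_equal_containall := by
  intro w i j _
  unfold Spec_containall containall containall_alt
  simp only [fold_counts]
  rw [search_counts]
  ring_nf
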